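-- pv_equiv track=rewrite | github.com/dukhniav/classfinder | scrape.py | get_final_class_list
-- ===== SOURCE A (Python) =====
-- def get_final_class_list(flat_classes_final):
--     classes = []
--     titles = []
--     crns = []
--     caps = []
--     enrls = []
--     avails = []
--     instrs = []
--     dates = []
--     class_ctr = 0
--     for c in flat_classes_final:
--         if class_ctr % 8 == 0:
--             classes.append(c)
--         if class_ctr % 8 == 1:
--             titles.append(c)
--         if class_ctr % 8 == 2:
--             crns.append(c)
--         if class_ctr % 8 == 3:
--             caps.append(c)
--         if class_ctr % 8 == 4:
--             enrls.append(c)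
--         if class_ctr % 8 == 5:
--             avails.append(c)
--         if class_ctr % 8 == 6:
--             instrs.append(c)
--         if class_ctr % 8 == 7:
--             dates.append(c)
--         class_ctr = class_ctr + 1
--     return avails, caps, classes, crns, dates, enrls, instrs, titles
-- ===== SOURCE B (Python) =====
-- def get_final_class_list(flat_classes_final):
--     flat = list(flat_classes_final)
--     classes = flat[0::8]
--     titles = flat[1::8]
--     crns = flat[2::8]
--     caps = flat[3::8]
--     enrls = flat[4::8]
--     avails = flat[5::8]
--     instrs = flat[6::8]
--     dates = flat[7::8]
--     return avails, caps, classes, crns, dates, enrls, instrs, titles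
-- ===== Notes on version B (the rewrite author's own statement) =====
-- stated objective: simpler
-- what changed: Replaced the single counter-driven loop that dispatches each element to one of eight lists by its index mod 8 with eight independent strided slices flat[r::8], one per column, returned in A's permuted order.
import Mathlib
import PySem

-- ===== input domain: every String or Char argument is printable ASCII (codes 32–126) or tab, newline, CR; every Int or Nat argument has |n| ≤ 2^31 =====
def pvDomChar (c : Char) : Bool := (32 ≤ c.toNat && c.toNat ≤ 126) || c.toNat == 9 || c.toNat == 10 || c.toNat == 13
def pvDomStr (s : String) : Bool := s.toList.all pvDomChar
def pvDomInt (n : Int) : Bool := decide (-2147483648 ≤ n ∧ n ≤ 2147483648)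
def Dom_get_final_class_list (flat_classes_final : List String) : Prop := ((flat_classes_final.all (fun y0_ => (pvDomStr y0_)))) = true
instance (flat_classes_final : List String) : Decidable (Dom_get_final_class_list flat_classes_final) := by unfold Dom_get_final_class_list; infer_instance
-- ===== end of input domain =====

-- B replaces A's single counter-driven loop (mod-8 dispatch into eight lists) with eight independent strided slices (objective: simpler).

-- ===== PORT A =====
-- A: one pass with a running counter class_ctr, appending each element to the bucket
-- selected by class_ctr % 8; state = the eight lists plus the counter.
def get_final_class_list (flat_classes_final : List String) : List String × List String × List String × List String × List String × List String × List String × List String :=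
  let st :=
    flat_classes_final.foldl
      (fun (s : List String × List String × List String × List String × List String × List String × List String × List String × Int) c =>
        let (classes, titles, crns, caps, enrls, avails, instrs, dates, class_ctr) := s
        let classes := if PySem.Int.mod class_ctr 8 = 0 then classes ++ [c] else classes
        let titles  := if PySem.Int.mod class_ctr 8 = 1 then titles ++ [c] else titles
        let crns    := if PySem.Int.mod class_ctr 8 = 2 then crns ++ [c] else crns
        let caps    := if PySem.Int.mod class_ctr 8 = 3 then caps ++ [c] else caps
        let enrls   := if PySem.Int.mod class_ctr 8 = 4 then enrls ++ [c] else enrls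
        let avails  := if PySem.Int.mod class_ctr 8 = 5 then avails ++ [c] else avails
        let instrs  := if PySem.Int.mod class_ctr 8 = 6 then instrs ++ [c] else instrs
        let dates   := if PySem.Int.mod class_ctr 8 = 7 then dates ++ [c] else dates
        (classes, titles, crns, caps, enrls, avails, instrs, dates, class_ctr + 1))
      ([], [], [], [], [], [], [], [], 0)
  let (classes, titles, crns, caps, enrls, avails, instrs, dates, _) := st
  (avails, caps, classes, crns, dates, enrls, instrs, titles)

-- ===== PORT B =====
-- hand port of the Python slice flat[r::8] (nonnegative start r, step 8), exact there:
-- the slice is pvStride8 (flat.drop r) — take the head, then skip 7, repeat.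
def pvStride8 (xs : List String) : List String :=
  match xs with
  | [] => []
  | x :: t => x :: pvStride8 (t.drop 7)
termination_by xs.length
decreasing_by simp

def get_final_class_list_alt (flat_classes_final : List String) : List String × List String × List String × List String × List String × List String × List String × List String :=
  let flat := flat_classes_final
  let classes := pvStride8 (flat.drop 0)
  let titles := pvStride8 (flat.drop 1)
  let crns := pvStride8 (flat.drop 2)
  let caps := pvStride8 (flat.drop 3)
  let enrls := pvStride8 (flat.drop 4)
  let avails := pvStride8 (flat.drop 5)
  let instrs := pvStride8 (flat.drop 6)
  let dates := pvStride8 (flat.drop 7)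
  (avails, caps, classes, crns, dates, enrls, instrs, titles)

-- ===== PRECONDITION & SPEC =====
-- instance search hits its size limit on the 8-fold product, so the DecidableEq
-- instance is assembled explicitly (plain defs, same instances it would have found).
def pvDecEq2 : DecidableEq (List String × List String) := inferInstance
def pvDecEq3 : DecidableEq (List String × List String × List String) := @instDecidableEqProd _ _ inferInstance pvDecEq2
def pvDecEq4 : DecidableEq (List String × List String × List String × List String) := @instDecidableEqProd _ _ inferInstance pvDecEq3
def pvDecEq5 : DecidableEq (List String × List String × List String × List String × List String) := @instDecidableEqProd _ _ inferInstance pvDecEq4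
def pvDecEq6 : DecidableEq (List String × List String × List String × List String × List String × List String) := @instDecidableEqProd _ _ inferInstance pvDecEq5
def pvDecEq7 : DecidableEq (List String × List String × List String × List String × List String × List String × List String) := @instDecidableEqProd _ _ inferInstance pvDecEq6
def pvDecEq8 : DecidableEq (List String × List String × List String × List String × List String × List String × List String × List String) := @instDecidableEqProd _ _ inferInstance pvDecEq7

def Spec_get_final_class_list (flat_classes_final : List String) (out : List String × List String × List String × List String × List String × List String × List String × List String) : Prop := out = get_final_class_list_alt flat_classes_final
instance (flat_classes_final : List String) (out : List String × List String × List String × List String × List String × List String × List String × List String) : Decidable (Spec_get_final_class_list flat_classes_final out) := by unfold Spec_get_final_class_list; exact pvDecEq8 out (get_final_class_list_alt flat_classes_final)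

-- ===== CLAIM (what is proved, stated in full; the proofs are below) =====
def Claim_equal_get_final_class_list : Prop := ∀ (flat_classes_final : List String), Dom_get_final_class_list flat_classes_final → Spec_get_final_class_list flat_classes_final (get_final_class_list flat_classes_final)

-- ===== LEMMAS AND PROOFS =====

theorem pvStride8_nil : pvStride8 [] = [] := by rw [pvStride8]
theorem pvStride8_cons (x : String) (t : List String) : pvStride8 (x :: t) = x :: pvStride8 (t.drop 7) := by rw [pvStride8]

-- the sublist of xs picked by bucket b when the counter starts at n
def pvPick (n b : Nat) (xs : List String) : List String :=
  match xs with
  | [] => []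
  | x :: t => (if n % 8 = b then [x] else []) ++ pvPick (n + 1) b t

theorem pvMod_natCast (n : Nat) : PySem.Int.mod (n : Int) 8 = ((n % 8 : Nat) : Int) := by
  have h : PySem.Int.mod (n : Int) 8 = Int.fmod (n : Int) 8 := rfl
  rw [h, Int.fmod_eq_emod]
  simp

theorem pvM0 (n : Nat) : (PySem.Int.mod (n : Int) 8 = 0) ↔ n % 8 = 0 := by rw [pvMod_natCast]; omega
theorem pvM1 (n : Nat) : (PySem.Int.mod (n : Int) 8 = 1) ↔ n % 8 = 1 := by rw [pvMod_natCast]; omega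
theorem pvM2 (n : Nat) : (PySem.Int.mod (n : Int) 8 = 2) ↔ n % 8 = 2 := by rw [pvMod_natCast]; omega
theorem pvM3 (n : Nat) : (PySem.Int.mod (n : Int) 8 = 3) ↔ n % 8 = 3 := by rw [pvMod_natCast]; omega
theorem pvM4 (n : Nat) : (PySem.Int.mod (n : Int) 8 = 4) ↔ n % 8 = 4 := by rw [pvMod_natCast]; omega
theorem pvM5 (n : Nat) : (PySem.Int.mod (n : Int) 8 = 5) ↔ n % 8 = 5 := by rw [pvMod_natCast]; omega
theorem pvM6 (n : Nat) : (PySem.Int.mod (n : Int) 8 = 6) ↔ n % 8 = 6 := by rw [pvMod_natCast]; omega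
theorem pvM7 (n : Nat) : (PySem.Int.mod (n : Int) 8 = 7) ↔ n % 8 = 7 := by rw [pvMod_natCast]; omega

theorem pvFold_spec (xs : List String) : ∀ (n : Nat) (l0 l1 l2 l3 l4 l5 l6 l7 : List String),
    xs.foldl
      (fun (s : List String × List String × List String × List String × List String × List String × List String × List String × Int) c =>
        let (classes, titles, crns, caps, enrls, avails, instrs, dates, class_ctr) := s
        let classes := if PySem.Int.mod class_ctr 8 = 0 then classes ++ [c] else classes
        let titles  := if PySem.Int.mod class_ctr 8 = 1 then titles ++ [c] else titles
        let crns    := if PySem.Int.mod class_ctr 8 = 2 then crns ++ [c] else crns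
        let caps    := if PySem.Int.mod class_ctr 8 = 3 then caps ++ [c] else caps
        let enrls   := if PySem.Int.mod class_ctr 8 = 4 then enrls ++ [c] else enrls
        let avails  := if PySem.Int.mod class_ctr 8 = 5 then avails ++ [c] else avails
        let instrs  := if PySem.Int.mod class_ctr 8 = 6 then instrs ++ [c] else instrs
        let dates   := if PySem.Int.mod class_ctr 8 = 7 then dates ++ [c] else dates
        (classes, titles, crns, caps, enrls, avails, instrs, dates, class_ctr + 1))
      (l0, l1, l2, l3, l4, l5, l6, l7, (n : Int))
    = (l0 ++ pvPick n 0 xs, l1 ++ pvPick n 1 xs, l2 ++ pvPick n 2 xs, l3 ++ pvPick n 3 xs,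
       l4 ++ pvPick n 4 xs, l5 ++ pvPick n 5 xs, l6 ++ pvPick n 6 xs, l7 ++ pvPick n 7 xs,
       ((n + xs.length : Nat) : Int)) := by
  induction xs with
  | nil => intro n l0 l1 l2 l3 l4 l5 l6 l7; simp [pvPick]
  | cons x t ih =>
    intro n l0 l1 l2 l3 l4 l5 l6 l7
    have hn : ((n : Int) + 1) = ((n + 1 : Nat) : Int) := by push_cast; ring
    simp only [List.foldl_cons, pvM0, pvM1, pvM2, pvM3, pvM4, pvM5, pvM6, pvM7, hn, ih]
    simp only [pvPick, Prod.mk.injEq]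
    refine ⟨?_, ?_, ?_, ?_, ?_, ?_, ?_, ?_, ?_⟩
    · split_ifs with h <;> simp
    · split_ifs with h <;> simp
    · split_ifs with h <;> simp
    · split_ifs with h <;> simp
    · split_ifs with h <;> simp
    · split_ifs with h <;> simp
    · split_ifs with h <;> simp
    · split_ifs with h <;> simp
    · simp; ring

theorem pvPick_eq_stride (xs : List String) : ∀ (n b : Nat), b < 8 →
    pvPick n b xs = pvStride8 (xs.drop ((b + 8 - n % 8) % 8)) := by
  induction xs with
  | nil => intro n b _; simp [pvPick, pvStride8_nil]
  | cons x t ih =>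
    intro n b hb
    by_cases h : n % 8 = b
    · have hd : (b + 8 - n % 8) % 8 = 0 := by omega
      have hd' : (b + 8 - (n + 1) % 8) % 8 = 7 := by omega
      simp [pvPick, h, pvStride8_cons, ih (n + 1) b hb, hd']
    · have hd : (b + 8 - n % 8) % 8 = (b + 8 - (n + 1) % 8) % 8 + 1 := by omega
      simp [pvPick, h, ih (n + 1) b hb, hd]

theorem pvPick_zero (xs : List String) (b : Nat) (hb : b < 8) :
    pvPick 0 b xs = pvStride8 (xs.drop b) := by
  have := pvPick_eq_stride xs 0 b hb
  simpa [Nat.mod_eq_of_lt hb] using this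

-- ===== VERDICT (by name: the statement is the Claim_ definition above) =====
theorem get_final_class_list_spec : Claim_equal_get_final_class_list := by
  intro xs _
  show _ = _
  unfold get_final_class_list get_final_class_list_alt
  have h := pvFold_spec xs 0 [] [] [] [] [] [] [] []
  simp only [Nat.cast_zero] at h
  simp only [h]
  simp [pvPick_zero xs 0 (by omega), pvPick_zero xs 1 (by omega), pvPick_zero xs 2 (by omega),
    pvPick_zero xs 3 (by omega), pvPick_zero xs 4 (by omega), pvPick_zero xs 5 (by omega),
    pvPick_zero xs 6 (by omega), pvPick_zero xs 7 (by omega)]
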